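-- pv_equiv track=rewrite | github.com/carrdelling/AdventOfCode2025 | day7/gold.py | solve
-- ===== SOURCE A (Python) =====
-- from collections import defaultdict
--
-- def solve(data):
--
--     area = set()
--     rays = {}
--     target = len(data)
--
--     for i, row in enumerate(data):
--         for j, c in enumerate(row):
--             if c == 'S':
--                 rays[j] = 1
--             if c == '^':
--                 area.add((i, j))
--
--
--     for i in range(1, target):
--
--         current = dict(rays)
--         rays = defaultdict(int)
--
--         for j, c in current.items():
--             if (i, j) in area:
--                 rays[j-1] += c
--                 rays[j+1] += c
--             else:
--                 rays[j] += c
--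
--     output = sum(rays.values())
--
--     return output
-- ===== SOURCE B (Python) =====
-- def solve(data):
--     # Backward dynamic programming over rows: d maps a column j to the number of
--     # endpoints a single ray entering the current row at column j produces
--     # (columns absent from d implicitly map to 1).  A instead sweeps a frontier
--     # of ray counts forward; by linearity the two agree.
--     target = len(data)
--
--     cols = set()
--     for row in data:
--         for j, c in enumerate(row):
--             if c == 'S':
--                 cols.add(j)
--
--     d = {}
--     for i in range(target - 1, 0, -1):
--         nd = dict(d)
--         for j, c in enumerate(data[i]):
--             if c == '^':
--                 nd[j] = d.get(j - 1, 1) + d.get(j + 1, 1)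
--         d = nd
--
--     return sum(d.get(j, 1) for j in cols)
-- ===== Notes on version B (the rewrite author's own statement) =====
-- stated objective: alternative
-- what changed: A sweeps a frontier dict of ray counts forward through the rows and sums it at the end; B instead builds a backward per-column table d with d[j] = number of endpoints one ray entering the current row at column j produces (absent columns implicitly 1) and sums d over the distinct S columns, which is equivalent by linearity of the split rule.
import Mathlib
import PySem

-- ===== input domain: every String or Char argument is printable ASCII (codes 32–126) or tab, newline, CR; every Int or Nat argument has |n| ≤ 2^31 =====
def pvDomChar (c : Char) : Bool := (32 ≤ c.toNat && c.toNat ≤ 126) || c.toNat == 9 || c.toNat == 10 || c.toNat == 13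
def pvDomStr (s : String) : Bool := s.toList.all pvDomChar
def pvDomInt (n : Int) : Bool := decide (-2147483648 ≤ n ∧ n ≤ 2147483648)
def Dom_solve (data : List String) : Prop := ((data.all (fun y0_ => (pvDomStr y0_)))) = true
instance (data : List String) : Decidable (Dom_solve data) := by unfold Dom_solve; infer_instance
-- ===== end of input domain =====

-- B replaces A's forward frontier sweep of ray counts by a backward per-column
-- endpoint-count table over the rows (objective: alternative decomposition).

-- ===== PORT A =====
-- A's first loop: collect the splitter cells (area) and the S columns (rays[j] = 1)
def pvA_scan (data : List String) : PySem.Set (Int × Int) × PySem.Dict Int Int :=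
  (PySem.List.enumerate data).foldl (fun st p =>
    (PySem.List.enumerate p.2.toList).foldl (fun st q =>
      let st := if q.2 == 'S' then (st.1, st.2.insert q.1 1) else st
      if q.2 == '^' then (PySem.Set.add st.1 (p.1, q.1), st.2) else st) st)
    (PySem.Set.empty, PySem.Dict.empty)

-- body of A's `for i in range(1, target)` loop (rays[j] += c is modify with default 0)
def pvA_step (area : PySem.Set (Int × Int)) (rays : PySem.Dict Int Int) (i : Int) :
    PySem.Dict Int Int :=
  rays.items.foldl (fun nd jc =>
    if PySem.Set.contains area (i, jc.1) then
      (nd.modify (jc.1 - 1) 0 (· + jc.2)).modify (jc.1 + 1) 0 (· + jc.2)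
    else nd.modify jc.1 0 (· + jc.2)) PySem.Dict.empty

def solve (data : List String) : Int :=
  let target : Int := (data.length : Int)
  let st := pvA_scan data
  let rays := (PySem.List.pyRange 1 target).foldl (pvA_step st.1) st.2
  rays.values.sum

-- ===== PORT B =====
-- {j for row in data for j, c in enumerate(row) if c == 'S'}
def pvB_cols (data : List String) : PySem.Set Int :=
  data.foldl (fun s row =>
    (PySem.List.enumerate row.toList).foldl (fun s q =>
      if q.2 == 'S' then PySem.Set.add s q.1 else s) s) PySem.Set.empty

-- body of B's backward loop: nd = dict(d); overwrite the splitter columns of row i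
-- (pyGetD with default "" is exact here: the loop only visits 1 ≤ i ≤ len(data)-1)
def pvB_step (data : List String) (d : PySem.Dict Int Int) (i : Int) : PySem.Dict Int Int :=
  (PySem.List.enumerate (PySem.List.pyGetD data i "").toList).foldl (fun nd q =>
    if q.2 == '^' then nd.insert q.1 (d.getD (q.1 - 1) 1 + d.getD (q.1 + 1) 1) else nd) d

def solve_alt (data : List String) : Int :=
  let target : Int := (data.length : Int)
  let d := (PySem.List.pyRange (target - 1) 0 (-1)).foldl (pvB_step data) PySem.Dict.empty
  ((pvB_cols data).map (fun j => d.getD j 1)).sum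

-- ===== PRECONDITION & SPEC =====
def Spec_solve (data : List String) (out : Int) : Prop := out = solve_alt data
instance (data : List String) (out : Int) : Decidable (Spec_solve data out) := by unfold Spec_solve; infer_instance

-- ===== CLAIM (what is proved, stated in full; the proofs are below) =====
def Claim_equal_solve : Prop := ∀ (data : List String), Dom_solve data → Spec_solve data (solve data)

-- ===== LEMMAS AND PROOFS =====

-- `data[i][j] == '^'` as a total predicate on integer coordinates
def pvSplit (data : List String) (i j : Int) : Bool :=
  decide (0 ≤ i) && decide (0 ≤ j) &&
    (((data.getD i.toNat "").toList.getD j.toNat ' ') == '^')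

-- number of endpoints produced by one ray entering row (len data - fuel) at column j
def pvG (data : List String) : Nat → Int → Int
  | 0, _ => 1
  | n+1, j =>
      if pvSplit data ((data.length : Int) - (n+1)) j then
        pvG data n (j-1) + pvG data n (j+1)
      else pvG data n j

-- weighted count of a frontier dict
def pvWS (w : Int → Int) (d : PySem.Dict Int Int) : Int :=
  (d.items.map (fun p => p.2 * w p.1)).sum

-- the S columns in scan order (with duplicates)
def pvRowS (row : List Char) : List Int :=
  (PySem.List.enumerate row).filterMap (fun q => if q.2 == 'S' then some q.1 else none)
def pvSCols (data : List String) : List Int :=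
  data.flatMap (fun row => pvRowS row.toList)

lemma pv_mem_enumerate {α : Type} (xs : List α) (s : Int) (p : Int × α) :
    p ∈ PySem.List.enumerate xs s ↔ ∃ k : Nat, xs[k]? = some p.2 ∧ p.1 = s + k := by
  induction xs generalizing s with
  | nil => simp [PySem.List.enumerate]
  | cons x t ih =>
      simp only [PySem.List.enumerate, List.mem_cons, ih]
      constructor
      · rintro (h | ⟨k, hk, hp⟩)
        · refine ⟨0, ?_, ?_⟩ <;> simp [Prod.ext_iff] at h <;> simp [h.1, h.2]
        · exact ⟨k+1, by simpa using hk, by push_cast; omega⟩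
      · rintro ⟨k, hk, hp⟩
        cases k with
        | zero =>
            left; simp only [List.getElem?_cons_zero, Option.some.injEq] at hk
            simp [Prod.ext_iff, hk, hp]
        | succ m => right; exact ⟨m, by simpa using hk, by push_cast at hp ⊢; omega⟩

lemma pv_pyRange_one_nil (a b : Int) (h : b ≤ a) : PySem.List.pyRange a b = [] := by
  simp [PySem.List.pyRange]; omega

lemma pv_pyRange_neg1_nil (a : Int) (h : a ≤ 0) : PySem.List.pyRange a 0 (-1) = [] := by
  simp [PySem.List.pyRange]; omega

lemma pv_pyRange_neg1_cons (a : Int) (h : 0 < a) :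
    PySem.List.pyRange a 0 (-1) = a :: PySem.List.pyRange (a-1) 0 (-1) := by
  simp only [PySem.List.pyRange]
  norm_num [h]
  rw [show (if 1 < a then a.toNat - 1 else 0) = a.toNat - 1 by split_ifs <;> omega,
    show a.toNat = (a.toNat - 1) + 1 by omega, List.range_succ_eq_map,
    List.map_cons, List.map_map]
  simp only [Nat.add_sub_cancel, List.cons.injEq]
  refine ⟨by simp, ?_⟩
  apply List.map_congr_left; intro k _; simp [Function.comp]; omega

lemma pv_foldl_fst {σ τ β : Type} (f : σ × τ → β → σ × τ) (f1 : σ → β → σ)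
    (h : ∀ st x, (f st x).1 = f1 st.1 x) (l : List β) (st : σ × τ) :
    (l.foldl f st).1 = l.foldl f1 st.1 := by
  induction l generalizing st with
  | nil => rfl
  | cons x t ih => simp only [List.foldl_cons, ih, h]

lemma pv_foldl_snd {σ τ β : Type} (f : σ × τ → β → σ × τ) (f2 : τ → β → τ)
    (h : ∀ st x, (f st x).2 = f2 st.2 x) (l : List β) (st : σ × τ) :
    (l.foldl f st).2 = l.foldl f2 st.2 := by
  induction l generalizing st with
  | nil => rfl
  | cons x t ih => simp only [List.foldl_cons, ih, h]

lemma pv_foldl_add_if {α β : Type} [BEq α] (c : β → Bool) (f : β → α)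
    (l : List β) (s : PySem.Set α) :
    l.foldl (fun s b => if c b then PySem.Set.add s (f b) else s) s
      = PySem.Set.update s (l.filterMap (fun b => if c b then some (f b) else none)) := by
  induction l generalizing s with
  | nil => rfl
  | cons b t ih =>
      by_cases hb : c b = true
      · simp [hb, ih, PySem.Set.update_cons]
      · have hb' : c b = false := by simpa using hb
        simp [hb', ih]

lemma pv_scan_fst (data : List String) :
    (pvA_scan data).1
      = (PySem.List.enumerate data).foldl (fun s p =>
          PySem.Set.update s ((PySem.List.enumerate p.2.toList).filterMap
            (fun q => if q.2 == '^' then some (p.1, q.1) else none))) PySem.Set.empty := by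
  unfold pvA_scan
  rw [pv_foldl_fst _ (fun s p => (PySem.List.enumerate p.2.toList).foldl
      (fun s q => if q.2 == '^' then PySem.Set.add s (p.1, q.1) else s) s)]
  · apply PySem.List.foldl_congr_mem
    intro s p _
    exact pv_foldl_add_if (fun q => q.2 == '^') (fun q => (p.1, q.1))
      (PySem.List.enumerate p.2.toList) s
  · intro st p
    rw [pv_foldl_fst _ (fun s q => if q.2 == '^' then PySem.Set.add s (p.1, q.1) else s)]
    intro st q
    by_cases h1 : q.2 == 'S' <;> by_cases h2 : q.2 == '^' <;> simp [h1, h2]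

lemma pv_mem_update_foldl {α β : Type} [BEq α] [LawfulBEq α] (l : List β)
    (g : β → List α) (s : PySem.Set α) (y : α) :
    y ∈ l.foldl (fun s b => PySem.Set.update s (g b)) s ↔ y ∈ s ∨ ∃ b ∈ l, y ∈ g b := by
  induction l generalizing s with
  | nil => simp
  | cons b t ih => simp [ih, PySem.Set.mem_update]; tauto

lemma pv_area_contains (data : List String) (i j : Int) :
    PySem.Set.contains (pvA_scan data).1 (i, j) = pvSplit data i j := by
  rw [Bool.eq_iff_iff, PySem.Set.contains_iff, pv_scan_fst, pv_mem_update_foldl]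
  simp only [PySem.Set.empty, List.not_mem_nil, false_or, List.mem_filterMap,
    pv_mem_enumerate]
  unfold pvSplit
  constructor
  · rintro ⟨p, ⟨k, hk, hp1⟩, q, ⟨m, hm, hq1⟩, hq⟩
    by_cases hc : q.2 == '^'
    · rw [if_pos hc] at hq
      have hij : p.1 = i ∧ q.1 = j := by simpa [Prod.ext_iff] using hq
      obtain ⟨hi, hj⟩ := hij
      rw [← hi, ← hj, hp1, hq1]
      have h1 : ((0:Int) + (k:Int)).toNat = k := by omega
      have h2 : ((0:Int) + (m:Int)).toNat = m := by omega
      rw [h1, h2]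
      simp [List.getD_eq_getElem?_getD, hk, hm]
      simpa using hc
    · rw [if_neg hc] at hq; exact absurd hq (by simp)
  · intro h
    simp only [Bool.and_eq_true, decide_eq_true_eq, beq_iff_eq,
      List.getD_eq_getElem?_getD] at h
    obtain ⟨⟨hi, hj⟩, hch⟩ := h
    rcases hrow : data[i.toNat]? with _ | row
    · rw [hrow] at hch; simp at hch
    rw [hrow] at hch
    simp only [Option.getD_some] at hch
    rcases hcc : row.toList[j.toNat]? with _ | c
    · rw [hcc] at hch; simp at hch
    rw [hcc] at hch
    simp only [Option.getD_some] at hch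
    subst hch
    refine ⟨(i, row), ⟨i.toNat, hrow, by omega⟩, (j, '^'), ⟨j.toNat, hcc, by omega⟩, by simp⟩

-- one insert of value 1 keeps the "all values 1" shape, tracking Set.add
lemma pv_items_insert_one (d : PySem.Dict Int Int) (s : PySem.Set Int)
    (h : d.items = s.map (fun j => (j, (1 : Int)))) (k : Int) :
    (d.insert k 1).items = (PySem.Set.add s k).map (fun j => (j, (1 : Int))) := by
  have hkeys : d.keys = s := by
    simp only [PySem.Dict.keys, h, List.map_map]
    exact List.map_id _ ▸ rfl
  by_cases hk : k ∈ s
  · have hc : d.contains k = true := by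
      rw [PySem.Dict.contains_iff_mem_keys, hkeys]; exact hk
    rw [PySem.Dict.items_insert_of_contains _ _ hc, PySem.Set.add_of_mem hk, h,
      List.map_map]
    apply List.map_congr_left
    intro j _
    by_cases hj : j = k <;> simp [hj]
  · have hc : d.contains k = false := by
      rw [Bool.eq_false_iff]; intro hcc
      exact hk (hkeys ▸ (PySem.Dict.contains_iff_mem_keys d k).mp hcc)
    rw [PySem.Dict.items_insert_of_not_contains _ _ hc, PySem.Set.add_of_not_mem hk, h]
    simp

lemma pv_dict_ones (l : List (Int × Char)) (d : PySem.Dict Int Int) (s : PySem.Set Int)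
    (h : d.items = s.map (fun j => (j, (1 : Int)))) :
    (l.foldl (fun d q => if q.2 == 'S' then d.insert q.1 1 else d) d).items
      = (l.foldl (fun s q => if q.2 == 'S' then PySem.Set.add s q.1 else s) s).map
          (fun j => (j, (1 : Int))) := by
  induction l generalizing d s with
  | nil => exact h
  | cons q t ih =>
      by_cases hq : q.2 == 'S'
      · simp only [List.foldl_cons, if_pos hq]
        exact ih _ _ (pv_items_insert_one d s h q.1)
      · simp only [List.foldl_cons, if_neg hq]
        exact ih _ _ h

lemma pv_foldl_enumerate_snd {α β : Type} (xs : List α) (h : β → α → β) :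
    ∀ (s0 : Int) (b : β),
    (PySem.List.enumerate xs s0).foldl (fun acc p => h acc p.2) b = xs.foldl h b := by
  induction xs with
  | nil => intro _ _; rfl
  | cons x t ih => intro s0 b; simp only [PySem.List.enumerate, List.foldl_cons, ih]

lemma pv_rows_ones : ∀ (rows : List String) (d : PySem.Dict Int Int) (s : PySem.Set Int),
    d.items = s.map (fun j => (j, (1 : Int))) →
    (rows.foldl (fun d row => (PySem.List.enumerate row.toList).foldl
        (fun d q => if q.2 == 'S' then d.insert q.1 1 else d) d) d).items
      = (rows.foldl (fun s row => PySem.Set.update s (pvRowS row.toList)) s).map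
          (fun j => (j, (1 : Int))) := by
  intro rows
  induction rows with
  | nil => intro d s h; exact h
  | cons r t ih =>
      intro d s h
      simp only [List.foldl_cons]
      apply ih
      rw [pv_dict_ones _ _ _ h, pv_foldl_add_if (fun q : Int × Char => q.2 == 'S')
        (fun q : Int × Char => q.1)]
      rfl

lemma pv_update_rows : ∀ (rows : List String) (s : PySem.Set Int),
    rows.foldl (fun s row => PySem.Set.update s (pvRowS row.toList)) s
      = PySem.Set.update s (pvSCols rows) := by
  intro rows
  induction rows with
  | nil => intro s; simp [pvSCols]
  | cons r t ih =>
      intro s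
      simp only [List.foldl_cons, ih]
      rw [show pvSCols (r :: t) = pvRowS r.toList ++ pvSCols t by
        simp [pvSCols], PySem.Set.update_append]

lemma pv_scan_items (data : List String) :
    (pvA_scan data).2.items
      = (PySem.Set.ofList (pvSCols data)).map (fun j => (j, (1 : Int))) := by
  unfold pvA_scan
  rw [pv_foldl_snd _ (fun d p => (PySem.List.enumerate p.2.toList).foldl
      (fun d q => if q.2 == 'S' then d.insert q.1 1 else d) d)]
  · have e1 := pv_foldl_enumerate_snd (β := PySem.Dict Int Int) data
      (fun d row => (PySem.List.enumerate row.toList).foldl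
        (fun d q => if q.2 == 'S' then d.insert q.1 1 else d) d) 0 PySem.Dict.empty
    have e0 : ((PySem.Set.empty, PySem.Dict.empty) :
        PySem.Set (Int × Int) × PySem.Dict Int Int).2 = PySem.Dict.empty := rfl
    rw [e0, e1, pv_rows_ones data PySem.Dict.empty PySem.Set.empty rfl,
      pv_update_rows]
    rw [show (PySem.Set.empty : PySem.Set Int) = ([] : List Int) from rfl,
      PySem.Set.update_nil_left]
  · intro st p
    rw [pv_foldl_snd _ (fun d q => if q.2 == 'S' then d.insert q.1 1 else d)]
    intro st q
    by_cases h1 : q.2 == 'S' <;> by_cases h2 : q.2 == '^' <;> simp [h1, h2]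

lemma pv_cols_eq (data : List String) :
    pvB_cols data = PySem.Set.ofList (pvSCols data) := by
  unfold pvB_cols
  rw [PySem.List.foldl_congr_mem _ _
    (fun s row => PySem.Set.update s (pvRowS row.toList)) PySem.Set.empty ?_]
  · rw [pv_update_rows]
    rw [show (PySem.Set.empty : PySem.Set Int) = ([] : List Int) from rfl,
      PySem.Set.update_nil_left]
  · intro s row _
    rw [pv_foldl_add_if (fun q : Int × Char => q.2 == 'S') (fun q : Int × Char => q.1)]
    rfl

-- sum over items with one value replaced (key k present once, value v)
lemma pv_sum_replace (w : Int → Int) (l : List (Int × Int)) (k v c : Int)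
    (hnd : (l.map Prod.fst).Nodup) (hmem : (k, v) ∈ l) :
    ((l.map (fun p => if p.1 == k then (k, v + c) else p)).map (fun p => p.2 * w p.1)).sum
      = ((l.map (fun p => p.2 * w p.1)).sum + c * w k) := by
  induction l with
  | nil => simp at hmem
  | cons p t ih =>
      simp only [List.map_cons, List.nodup_cons, List.mem_map] at hnd
      rcases List.mem_cons.mp hmem with hp | hp
      · subst hp
        simp only [List.map_cons, beq_self_eq_true, if_pos, List.sum_cons]
        have ht : (t.map (fun p => if p.1 == k then (k, v + c) else p)) = t.map id := by
          apply List.map_congr_left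
          intro q hq
          have : q.1 ≠ k := fun h => hnd.1 ⟨q, hq, h⟩
          simp [this]
        rw [List.map_id] at ht
        rw [ht]; ring
      · have hpk : p.1 ≠ k := fun h => hnd.1 ⟨(k, v), hp, by simp [h]⟩
        have hne : (p.1 == k) = false := by simpa using hpk
        simp only [List.map_cons, hne, Bool.false_eq_true, if_false, List.sum_cons,
          ih hnd.2 hp]
        ring

lemma pv_ws_modify (w : Int → Int) (d : PySem.Dict Int Int) (h : d.keys.Nodup)
    (k c : Int) : pvWS w (d.modify k 0 (· + c)) = pvWS w d + c * w k := by
  unfold pvWS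
  rw [show d.modify k 0 (· + c) = d.insert k (d.getD k 0 + c) from rfl]
  by_cases hc : d.contains k = true
  · have hsome : ∃ v, d.get? k = some v := by
      rcases hv : d.get? k with _ | v
      · rw [PySem.Dict.get?_eq_none_iff_contains] at hv; simp [hv] at hc
      · exact ⟨v, rfl⟩
    obtain ⟨v, hv⟩ := hsome
    have hgd : d.getD k 0 = v := PySem.Dict.getD_of_get?_eq_some d 0 hv
    have hmem : (k, v) ∈ d.items := PySem.Dict.mem_items_of_get?_eq_some d hv
    have hnd : (d.items.map Prod.fst).Nodup := h
    rw [PySem.Dict.items_insert_of_contains _ _ hc, hgd]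
    exact pv_sum_replace w d.items k v c hnd hmem
  · have hgd : d.getD k 0 = 0 := PySem.Dict.getD_of_not_contains _ _ (by simpa using hc)
    rw [PySem.Dict.items_insert_of_not_contains _ _ (by simpa using hc), hgd]
    simp

lemma pv_nodup_keys_modify {κ ν : Type} [BEq κ] [LawfulBEq κ]
    (d : PySem.Dict κ ν) (k : κ) (d0 : ν) (f : ν → ν) (h : d.keys.Nodup) :
    (d.modify k d0 f).keys.Nodup := by
  rw [PySem.Dict.keys_modify]
  by_cases hc : d.contains k = true
  · rwa [PySem.Dict.keys_insert_of_contains _ _ hc]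
  · rw [PySem.Dict.keys_insert_of_not_contains _ _ (by simpa using hc)]
    have hk : k ∉ d.keys := fun hm => hc ((PySem.Dict.contains_iff_mem_keys d k).mpr hm)
    simp only [List.nodup_append, List.nodup_singleton, true_and]
    refine ⟨h, fun a ha b hb hab => ?_⟩
    simp only [List.mem_singleton] at hb; subst hb
    exact hk (hab ▸ ha)

lemma pv_stepfold_ws (w : Int → Int) (sp : Int → Bool) :
    ∀ (l : List (Int × Int)) (nd : PySem.Dict Int Int), nd.keys.Nodup →
    pvWS w (l.foldl (fun nd jc =>
        if sp jc.1 then (nd.modify (jc.1 - 1) 0 (· + jc.2)).modify (jc.1 + 1) 0 (· + jc.2)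
        else nd.modify jc.1 0 (· + jc.2)) nd)
      = pvWS w nd + (l.map (fun jc =>
          jc.2 * (if sp jc.1 then w (jc.1 - 1) + w (jc.1 + 1) else w jc.1))).sum := by
  intro l
  induction l with
  | nil => intro nd _; simp
  | cons jc t ih =>
      intro nd hnd
      simp only [List.foldl_cons, List.map_cons, List.sum_cons]
      by_cases hs : sp jc.1 = true
      · rw [if_pos hs, if_pos hs,
          ih _ (pv_nodup_keys_modify _ _ _ _ (pv_nodup_keys_modify _ _ _ _ hnd)),
          pv_ws_modify w _ (pv_nodup_keys_modify _ _ _ _ hnd),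
          pv_ws_modify w _ hnd]
        ring
      · rw [if_neg hs, if_neg hs, ih _ (pv_nodup_keys_modify _ _ _ _ hnd),
          pv_ws_modify w _ hnd]
        ring

lemma pv_step_ws (data : List String) (ar : PySem.Set (Int × Int))
    (har : ∀ i j, PySem.Set.contains ar (i, j) = pvSplit data i j)
    (n : Nat) (r : PySem.Dict Int Int) :
    pvWS (pvG data n) (pvA_step ar r ((data.length : Int) - (n+1)))
      = pvWS (pvG data (n+1)) r := by
  unfold pvA_step
  have h1 := pv_stepfold_ws (pvG data n)
    (fun j => PySem.Set.contains ar ((data.length : Int) - (n+1), j)) r.items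
    PySem.Dict.empty (by simp)
  have h0 : pvWS (pvG data n) PySem.Dict.empty = 0 := rfl
  rw [show pvWS (pvG data n)
      (r.items.foldl (fun nd jc =>
        if PySem.Set.contains ar ((data.length : Int) - (n+1), jc.1) then
          (nd.modify (jc.1 - 1) 0 (· + jc.2)).modify (jc.1 + 1) 0 (· + jc.2)
        else nd.modify jc.1 0 (· + jc.2)) PySem.Dict.empty)
    = pvWS (pvG data n) PySem.Dict.empty + (r.items.map (fun jc =>
        jc.2 * (if PySem.Set.contains ar ((data.length : Int) - (n+1), jc.1) then
          pvG data n (jc.1 - 1) + pvG data n (jc.1 + 1) else pvG data n jc.1))).sum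
    from h1, h0, zero_add]
  unfold pvWS
  congr 1
  apply List.map_congr_left
  intro jc _
  rw [har]
  show jc.2 * _ = jc.2 * pvG data (n+1) jc.1
  simp only [pvG]

lemma pv_loopA (data : List String) (ar : PySem.Set (Int × Int))
    (har : ∀ i j, PySem.Set.contains ar (i, j) = pvSplit data i j) :
    ∀ (m : Nat) (a : Int), a = (data.length : Int) - m → 1 ≤ a →
      ∀ (r : PySem.Dict Int Int),
      (((PySem.List.pyRange a (data.length : Int)).foldl (pvA_step ar) r).values).sum
        = pvWS (pvG data m) r := by
  intro m
  induction m with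
  | zero =>
      intro a ha _ r
      rw [pv_pyRange_one_nil _ _ (by omega)]
      simp only [List.foldl_nil, PySem.Dict.values, pvWS]
      congr 1
      apply List.map_congr_left
      intro p _
      show p.2 = p.2 * pvG data 0 p.1
      simp [pvG]
  | succ n ih =>
      intro a ha ha1 r
      have haL : a < (data.length : Int) := by omega
      rw [PySem.List.pyRange_one_cons haL, List.foldl_cons]
      rw [ih (a+1) (by push_cast at ha ⊢; omega) (by omega) _]
      rw [show a = (data.length : Int) - (n+1) by push_cast at ha ⊢; omega]
      exact pv_step_ws data ar har n r

-- B's row step: getD after a fold of inserts that read only from the old dict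
lemma pv_insfold_getD (v : Int → Int) :
    ∀ (l : List (Int × Char)) (nd : PySem.Dict Int Int) (j : Int),
    ((l.foldl (fun nd q => if q.2 == '^' then nd.insert q.1 (v q.1) else nd) nd)).getD j 1
      = if l.any (fun q => q.2 == '^' && q.1 == j) then v j else nd.getD j 1 := by
  intro l
  induction l with
  | nil => intro nd j; simp
  | cons q t ih =>
      intro nd j
      simp only [List.foldl_cons, List.any_cons]
      by_cases hq : (q.2 == '^') = true
      · rw [if_pos hq, ih]
        by_cases hj : q.1 = j
        · subst hj
          have hcond : (q.2 == '^' && q.1 == q.1) = true := by simp [hq]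
          simp only [hcond, Bool.true_or, if_pos]
          split_ifs with ht
          · rfl
          · exact PySem.Dict.getD_insert_self nd q.1 (v q.1) 1
        · have hcond : (q.2 == '^' && q.1 == j) = false := by simp [hj]
          simp only [hcond, Bool.false_or]
          split_ifs with ht
          · rfl
          · exact PySem.Dict.getD_insert_of_ne nd (v q.1) 1 (fun h => hj h.symm)
      · have hq' : (q.2 == '^') = false := by simpa using hq
        simp only [hq', Bool.false_eq_true, if_false, Bool.false_and, Bool.false_or]
        exact ih nd j

lemma pv_any_split (data : List String) (a : Int) (ha : 0 ≤ a) (j : Int) :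
    ((PySem.List.enumerate (PySem.List.pyGetD data a "").toList).any
        (fun q => q.2 == '^' && q.1 == j))
      = pvSplit data a j := by
  rw [PySem.List.pyGetD_of_nonneg _ _ ha, Bool.eq_iff_iff, List.any_eq_true]
  unfold pvSplit
  constructor
  · rintro ⟨q, hq, hcond⟩
    rw [pv_mem_enumerate] at hq
    obtain ⟨m, hm, hq1⟩ := hq
    simp only [Bool.and_eq_true, beq_iff_eq] at hcond
    obtain ⟨hup, hjq⟩ := hcond
    have hj : j = (m : Int) := by omega
    subst hj
    simp only [Bool.and_eq_true, decide_eq_true_eq, beq_iff_eq]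
    refine ⟨⟨ha, by omega⟩, ?_⟩
    rw [show ((m : Int)).toNat = m by omega, List.getD_eq_getElem?_getD, hm, hup]
    rfl
  · intro h
    simp only [Bool.and_eq_true, decide_eq_true_eq, beq_iff_eq] at h
    obtain ⟨⟨_, hj⟩, hch⟩ := h
    rcases hcc : (data.getD a.toNat "").toList[j.toNat]? with _ | c
    · rw [List.getD_eq_getElem?_getD, hcc] at hch; simp at hch
    rw [List.getD_eq_getElem?_getD, hcc] at hch
    simp only [Option.getD_some] at hch
    subst hch
    refine ⟨(j, '^'), ?_, by simp⟩
    rw [pv_mem_enumerate]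
    exact ⟨j.toNat, hcc, by omega⟩

lemma pv_stepB_getD (data : List String) (d : PySem.Dict Int Int) (a : Int)
    (ha : 0 ≤ a) (j : Int) :
    (pvB_step data d a).getD j 1
      = if pvSplit data a j then d.getD (j-1) 1 + d.getD (j+1) 1 else d.getD j 1 := by
  unfold pvB_step
  rw [show ((PySem.List.enumerate (PySem.List.pyGetD data a "").toList).foldl
      (fun nd q => if q.2 == '^'
        then nd.insert q.1 (d.getD (q.1 - 1) 1 + d.getD (q.1 + 1) 1) else nd) d).getD j 1
    = if (PySem.List.enumerate (PySem.List.pyGetD data a "").toList).any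
        (fun q => q.2 == '^' && q.1 == j)
      then d.getD (j - 1) 1 + d.getD (j + 1) 1 else d.getD j 1
    from pv_insfold_getD (fun k => d.getD (k - 1) 1 + d.getD (k + 1) 1) _ d j]
  rw [pv_any_split data a ha j]

lemma pv_loopB (data : List String) :
    ∀ (m : Nat) (a : Int), a = (m : Int) → a ≤ (data.length : Int) - 1 →
      ∀ (d : PySem.Dict Int Int),
      (∀ j, d.getD j 1 = pvG data ((data.length : Int) - 1 - a).toNat j) →
      ∀ j, (((PySem.List.pyRange a 0 (-1)).foldl (pvB_step data) d)).getD j 1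
        = pvG data ((data.length : Int) - 1).toNat j := by
  intro m
  induction m with
  | zero =>
      intro a ha _ d hd j
      rw [pv_pyRange_neg1_nil _ (by omega), List.foldl_nil, hd j]
      norm_num [ha]
  | succ n ih =>
      intro a ha haL d hd j
      have ha0 : 0 < a := by omega
      rw [pv_pyRange_neg1_cons _ ha0, List.foldl_cons]
      apply ih (a-1) (by omega) (by omega)
      intro j'
      rw [pv_stepB_getD data d a (by omega) j']
      have hk : ((data.length : Int) - 1 - (a-1)).toNat
          = ((data.length : Int) - 1 - a).toNat + 1 := by omega
      rw [hk]
      simp only [pvG]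
      rw [show ((data.length : Int) - ((((data.length : Int) - 1 - a).toNat : Int) + 1)) = a
        by omega]
      by_cases hs : pvSplit data a j' = true
      · rw [if_pos hs, if_pos hs, hd (j'-1), hd (j'+1)]
      · rw [if_neg hs, if_neg hs, hd j']

-- ===== VERDICT (by name: the statement is the Claim_ definition above) =====
theorem solve_spec : Claim_equal_solve := by
  intro data _
  unfold Spec_solve solve solve_alt
  rcases data with _ | ⟨r, rest⟩
  · rfl
  set data := r :: rest with hdata
  have hL : 1 ≤ data.length := by simp [hdata]
  -- A's side
  have hA : (((PySem.List.pyRange 1 (data.length : Int)).foldl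
        (pvA_step (pvA_scan data).1) (pvA_scan data).2).values).sum
      = pvWS (pvG data (data.length - 1)) (pvA_scan data).2 :=
    pv_loopA data (pvA_scan data).1 (pv_area_contains data) (data.length - 1) 1
      (by omega) (by omega) _
  rw [hA]
  -- B's side
  have hB := pv_loopB data (data.length - 1) ((data.length : Int) - 1)
    (by omega) (by omega) PySem.Dict.empty
    (by intro j
        rw [show ((data.length : Int) - 1 - ((data.length : Int) - 1)).toNat = 0 by omega]
        rfl)
  have hn : ((data.length : Int) - 1).toNat = data.length - 1 := by omega
  unfold pvWS
  rw [pv_scan_items data, pv_cols_eq data, List.map_map]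
  congr 1
  apply List.map_congr_left
  intro j _
  show (1 : Int) * pvG data (data.length - 1) j = _
  rw [one_mul, hB j, hn]
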